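-- pv_equiv track=rewrite | github.com/arianneroselina/Name-Tag-Editor | src/edit_image.py | distribute_y_pos
-- ===== SOURCE A (Python) =====
-- def distribute_y_pos(y1, y2, text_lines, font_size):
--     """
--     Distribute y positions for a list of text lines, ensuring they are vertically centered between y1 and y2.
--     """
--     y_positions = []
--     num_elements = len(text_lines)
--     remaining_space = y2 - y1 - (num_elements * font_size)
--     additional_space = remaining_space // 2
--
--     current_y = y1 + additional_space + font_size // 2
--     for _ in range(num_elements):
--         y_positions.append(current_y)
--         current_y += font_size
--
--     return y_positions
-- ===== SOURCE B (Python) =====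
-- def distribute_y_pos(y1, y2, text_lines, font_size):
--     # Two-pointer symmetric fill: positions are symmetric about the band's
--     # center, so fill the front half ascending and the back half descending
--     # at the same time, then stitch front + middle + reversed back.
--     n = len(text_lines)
--     lo = y1 + (y2 - y1 - n * font_size) // 2 + font_size // 2
--     hi = lo + (n - 1) * font_size
--     front, back = [], []
--     for _ in range(n // 2):
--         front.append(lo)
--         back.append(hi)
--         lo += font_size
--         hi -= font_size
--     mid = [lo] if n % 2 else []
--     back.reverse()
--     return front + mid + back
-- ===== Notes on version B (the rewrite author's own statement) =====
-- stated objective: alternative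
-- what changed: Replaces A's single running-y accumulator loop over all n lines with a two-pointer symmetric fill: it computes the first and last positions, fills the front half ascending and the back half descending in n//2 iterations exploiting the symmetry pos_i + pos_(n-1-i) = const, inserts a middle element for odd n, and returns front + mid + reversed(back).
import Mathlib
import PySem

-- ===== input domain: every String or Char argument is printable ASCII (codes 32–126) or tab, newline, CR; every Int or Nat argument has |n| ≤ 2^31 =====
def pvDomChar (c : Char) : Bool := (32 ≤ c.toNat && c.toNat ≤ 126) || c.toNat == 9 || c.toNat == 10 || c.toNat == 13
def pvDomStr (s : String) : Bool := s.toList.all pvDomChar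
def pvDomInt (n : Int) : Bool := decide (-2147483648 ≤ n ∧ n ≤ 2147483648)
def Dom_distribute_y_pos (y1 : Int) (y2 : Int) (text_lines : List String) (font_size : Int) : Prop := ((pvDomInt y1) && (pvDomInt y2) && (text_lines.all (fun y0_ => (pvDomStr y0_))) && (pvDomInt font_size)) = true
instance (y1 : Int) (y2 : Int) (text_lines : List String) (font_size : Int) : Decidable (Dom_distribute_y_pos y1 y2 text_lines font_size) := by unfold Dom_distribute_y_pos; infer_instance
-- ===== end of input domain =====

-- B replaces A's single running-y accumulator loop with a two-pointer symmetric fill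
-- (front half ascending, back half descending, middle element for odd n); objective: alternative.


-- ===== PORT A =====
def distribute_y_pos (y1 : Int) (y2 : Int) (text_lines : List String) (font_size : Int) : List Int :=
  let num_elements : Int := text_lines.length
  let remaining_space : Int := y2 - y1 - num_elements * font_size
  let additional_space : Int := PySem.Int.floordiv remaining_space 2
  let current_y : Int := y1 + additional_space + PySem.Int.floordiv font_size 2
  (((List.range text_lines.length).foldl
      (fun (st : List Int × Int) _ => (st.1 ++ [st.2], st.2 + font_size))
      ([], current_y))).1

-- ===== PORT B =====
def distribute_y_pos_alt (y1 : Int) (y2 : Int) (text_lines : List String) (font_size : Int) : List Int :=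
  let n : Nat := text_lines.length
  let lo : Int := y1 + PySem.Int.floordiv (y2 - y1 - (n : Int) * font_size) 2
      + PySem.Int.floordiv font_size 2
  let hi : Int := lo + ((n : Int) - 1) * font_size
  let st := (List.range (n / 2)).foldl
      (fun (s : List Int × List Int × Int × Int) _ =>
        (s.1 ++ [s.2.2.1], s.2.1 ++ [s.2.2.2], s.2.2.1 + font_size, s.2.2.2 - font_size))
      ([], [], lo, hi)
  let mid : List Int := if n % 2 ≠ 0 then [st.2.2.1] else []
  st.1 ++ mid ++ st.2.1.reverse

-- ===== PRECONDITION & SPEC =====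
def Spec_distribute_y_pos (y1 : Int) (y2 : Int) (text_lines : List String) (font_size : Int) (out : List Int) : Prop := out = distribute_y_pos_alt y1 y2 text_lines font_size
instance (y1 : Int) (y2 : Int) (text_lines : List String) (font_size : Int) (out : List Int) : Decidable (Spec_distribute_y_pos y1 y2 text_lines font_size out) := by unfold Spec_distribute_y_pos; infer_instance

-- ===== CLAIM (what is proved, stated in full; the proofs are below) =====
def Claim_equal_distribute_y_pos : Prop := ∀ (y1 : Int) (y2 : Int) (text_lines : List String) (font_size : Int), Dom_distribute_y_pos y1 y2 text_lines font_size → Spec_distribute_y_pos y1 y2 text_lines font_size (distribute_y_pos y1 y2 text_lines font_size)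

-- ===== LEMMAS AND PROOFS =====
-- A's loop produces the arithmetic sequence base + i*fs.
theorem dyp_loopA (n : Nat) (base fs : Int) (acc : List Int) :
    (List.range n).foldl (fun (st : List Int × Int) _ => (st.1 ++ [st.2], st.2 + fs)) (acc, base)
      = (acc ++ (List.range n).map (fun (i : Nat) => base + (i : Int) * fs), base + (n : Int) * fs) := by
  induction n generalizing base acc with
  | zero => simp
  | succ n ih =>
    rw [List.range_succ, List.foldl_append, ih]
    simp
    ring

-- B's two-pointer loop produces the ascending front half and descending back half.
theorem dyp_loopB (k : Nat) (lo hi fs : Int) (a b : List Int) :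
    (List.range k).foldl
      (fun (s : List Int × List Int × Int × Int) _ =>
        (s.1 ++ [s.2.2.1], s.2.1 ++ [s.2.2.2], s.2.2.1 + fs, s.2.2.2 - fs))
      (a, b, lo, hi)
      = (a ++ (List.range k).map (fun (i : Nat) => lo + (i : Int) * fs),
         b ++ (List.range k).map (fun (i : Nat) => hi - (i : Int) * fs),
         lo + (k : Int) * fs, hi - (k : Int) * fs) := by
  induction k generalizing lo hi a b with
  | zero => simp
  | succ k ih =>
    rw [List.range_succ, List.foldl_append, ih, List.map_append, List.map_append]
    simp only [List.foldl_cons, List.foldl_nil, List.map_cons, List.map_nil,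
      List.append_assoc, Prod.mk.injEq]
    push_cast
    exact ⟨trivial, trivial, by ring, by ring⟩

-- reversing the descending back half gives an ascending tail segment
theorem dyp_rev (k : Nat) (hi fs : Int) :
    ((List.range k).map (fun (i : Nat) => hi - (i : Int) * fs)).reverse
      = (List.range k).map (fun (i : Nat) => hi - ((k : Int) - 1) * fs + (i : Int) * fs) := by
  induction k generalizing hi with
  | zero => simp
  | succ k ih =>
    conv_lhs => rw [List.range_succ]
    rw [List.map_append, List.reverse_append, ih, List.range_succ_eq_map]
    simp only [List.map_cons, List.map_nil, List.reverse_cons, List.reverse_nil,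
      List.nil_append, List.singleton_append, List.cons.injEq, List.map_map]
    constructor
    · push_cast; ring
    · refine List.map_congr_left (fun i _ => ?_)
      simp only [Function.comp_apply]
      push_cast; ring

-- ===== VERDICT (by name: the statement is the Claim_ definition above) =====
theorem distribute_y_pos_spec : Claim_equal_distribute_y_pos := by
  intro y1 y2 tl fs _
  unfold Spec_distribute_y_pos distribute_y_pos distribute_y_pos_alt
  simp only [dyp_loopA, dyp_loopB, dyp_rev, List.nil_append]
  set n := tl.length with hn
  set base : Int := y1 + PySem.Int.floordiv (y2 - y1 - (n : Int) * fs) 2 + PySem.Int.floordiv fs 2 with hbase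
  have hsplit : n = n / 2 + n % 2 + n / 2 := by omega
  have hcast : (n : Int) = (n / 2 : Nat) + (n % 2 : Nat) + (n / 2 : Nat) := by
    exact_mod_cast congrArg (Nat.cast : Nat → Int) hsplit
  rw [show (List.range n) = List.range (n / 2 + n % 2 + n / 2) from by rw [← hsplit],
      List.range_add, List.range_add, List.map_append, List.map_append]
  simp only [List.append_assoc, List.map_map]
  congr 1
  congr 1
  · rcases Nat.mod_two_eq_zero_or_one n with h | h <;> simp [h]
  · refine List.map_congr_left (fun i _ => ?_)
    simp only [Function.comp, Nat.cast_add]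
    linear_combination (-fs) * hcast
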